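-- pv_equiv track=rewrite | github.com/TNAHOM/A2SV | camp/sort-colors.py | sortColors
-- ===== SOURCE A (Python) =====
-- def sortColors(nums):
--     """
--     :type nums: List[int]
--     :rtype: None Do not return anything, modify nums in-place instead.
--     """
--
--     len_arr = len(nums)-1
--     sort = False
--
--     while not sort:
--         sort = True
--         for x in range(len_arr):
--             if nums[x] > nums[x+1]:
--                 nums[x], nums[x+1] = nums[x+1], nums[x]
--                 sort = False
--     return nums
-- ===== SOURCE B (Python) =====
-- def sortColors(nums):
--     """
--     :type nums: List[int]
--     :rtype: None Do not return anything, modify nums in-place instead.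
--     """
--     nums[:] = sorted(nums)
--     return nums
-- ===== Notes on version B (the rewrite author's own statement) =====
-- stated objective: faster
-- what changed: Replaces the hand-written repeat-until-no-swap bubble sort with a single in-place assignment of the built-in sorted() (Timsort).
import Mathlib
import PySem

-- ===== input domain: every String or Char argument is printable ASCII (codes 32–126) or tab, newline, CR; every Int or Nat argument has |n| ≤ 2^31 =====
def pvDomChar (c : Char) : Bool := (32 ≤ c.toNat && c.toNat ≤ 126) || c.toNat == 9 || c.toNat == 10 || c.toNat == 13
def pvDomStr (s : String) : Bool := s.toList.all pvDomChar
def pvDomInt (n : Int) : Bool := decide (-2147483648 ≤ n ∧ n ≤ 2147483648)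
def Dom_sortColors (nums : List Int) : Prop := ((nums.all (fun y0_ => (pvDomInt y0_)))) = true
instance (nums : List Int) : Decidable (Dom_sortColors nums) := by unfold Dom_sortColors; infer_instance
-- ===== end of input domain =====

-- B replaces A's repeat-until-no-swap bubble sort with Python's built-in sorted()
-- (assigned back in place, so the in-place mutation of A is preserved); asymptotically faster.

-- ===== PORT A =====
-- one iteration of A's inner 'for x in range(len(nums)-1)' loop of adjacent
-- compare-and-swaps, returning the list after the pass and the 'sort' flag
-- (true = no swap happened during the pass)
def onePass : List Int → List Int × Bool
  | [] => ([], true)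
  | [a] => ([a], true)
  | a :: b :: t =>
    if b < a then
      let r := onePass (a :: t)
      (b :: r.1, false)
    else
      let r := onePass (b :: t)
      (a :: r.1, r.2)
termination_by l => l.length

-- A's outer 'while not sort' loop; the fuel is a totality guard only
-- (the loop provably stops within inversions+1 ≤ n²+1 passes)
def bubbleLoop : Nat → List Int → List Int
  | 0, l => l
  | f + 1, l =>
    let p := onePass l
    if p.2 then p.1 else bubbleLoop f p.1

def sortColors (nums : List Int) : List Int :=
  bubbleLoop (nums.length * nums.length + 1) nums

-- ===== PORT B =====
def sortColors_alt (nums : List Int) : List Int :=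
  PySem.List.sorted nums (fun x => x) false

-- ===== PRECONDITION & SPEC =====
def Spec_sortColors (nums : List Int) (out : List Int) : Prop := out = sortColors_alt nums
instance (nums : List Int) (out : List Int) : Decidable (Spec_sortColors nums out) := by unfold Spec_sortColors; infer_instance

-- ===== CLAIM (what is proved, stated in full; the proofs are below) =====
def Claim_equal_sortColors : Prop := ∀ (nums : List Int), Dom_sortColors nums → Spec_sortColors nums (sortColors nums)

-- ===== LEMMAS AND PROOFS =====

-- number of inversions of a list (the loop's termination measure)
def inv : List Int → Nat
  | [] => 0
  | a :: t => t.countP (fun b => decide (b < a)) + inv t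

theorem onePass_perm : ∀ l : List Int, (onePass l).1.Perm l := by
  intro l
  induction l using onePass.induct with
  | case1 => simp [onePass]
  | case2 a => simp [onePass]
  | case3 a b t h ih =>
      simp only [onePass, if_pos h]
      exact ((ih.cons b).trans (List.Perm.swap a b t))
  | case4 a b t h ih =>
      simp only [onePass, if_neg h]
      exact ih.cons a

theorem onePass_flag_true : ∀ l : List Int, (onePass l).2 = true →
    (onePass l).1 = l ∧ l.Pairwise (· ≤ ·) := by
  intro l
  induction l using onePass.induct with
  | case1 => simp [onePass]
  | case2 a => simp [onePass]
  | case3 a b t h ih =>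
      simp [onePass, if_pos h]
  | case4 a b t h ih =>
      simp only [onePass, if_neg h]
      intro hf
      obtain ⟨h1, h2⟩ := ih hf
      refine ⟨by simp [h1], ?_⟩
      have hab : a ≤ b := le_of_not_gt h
      refine List.Pairwise.cons ?_ h2
      intro x hx
      cases hx with
      | head => exact hab
      | tail _ hx => exact hab.trans (List.rel_of_pairwise_cons h2 hx)

theorem countP_onePass (p : Int → Bool) (l : List Int) :
    (onePass l).1.countP p = l.countP p :=
  (onePass_perm l).countP_eq p

theorem inv_onePass_le : ∀ l : List Int, inv (onePass l).1 ≤ inv l := by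
  intro l
  induction l using onePass.induct with
  | case1 => simp [onePass]
  | case2 a => simp [onePass]
  | case3 a b t h ih =>
      simp only [onePass, if_pos h, inv]
      have hc := countP_onePass (fun x => decide (x < b)) (a :: t)
      have hc2 : (a :: t).countP (fun x => decide (x < b)) = t.countP (fun x => decide (x < b)) := by
        simp [not_lt.mpr (le_of_lt h)]
      have hat : inv (a :: t) = t.countP (fun x => decide (x < a)) + inv t := rfl
      have hmono : t.countP (fun x => decide (x < b)) ≤ t.countP (fun x => decide (x < a)) := by
        apply List.countP_mono_left
        intro x hx hxb
        simp at hxb ⊢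
        exact hxb.trans h
      simp only [List.countP_cons]
      omega
  | case4 a b t h ih =>
      simp only [onePass, if_neg h, inv]
      have hc := countP_onePass (fun x => decide (x < a)) (b :: t)
      have hbt : inv (b :: t) = t.countP (fun x => decide (x < b)) + inv t := rfl
      omega

theorem inv_onePass_lt : ∀ l : List Int, (onePass l).2 = false →
    inv (onePass l).1 < inv l := by
  intro l
  induction l using onePass.induct with
  | case1 => simp [onePass]
  | case2 a => simp [onePass]
  | case3 a b t h ih =>
      intro _
      simp only [onePass, if_pos h, inv]
      have hle := inv_onePass_le (a :: t)
      have hc := countP_onePass (fun x => decide (x < b)) (a :: t)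
      have hc2 : (a :: t).countP (fun x => decide (x < b)) = t.countP (fun x => decide (x < b)) := by
        simp [not_lt.mpr (le_of_lt h)]
      have hat : inv (a :: t) = t.countP (fun x => decide (x < a)) + inv t := rfl
      have hmono : t.countP (fun x => decide (x < b)) ≤ t.countP (fun x => decide (x < a)) := by
        apply List.countP_mono_left
        intro x hx hxb
        simp at hxb ⊢
        exact hxb.trans h
      simp only [List.countP_cons, h, decide_true, if_true]
      omega
  | case4 a b t h ih =>
      simp only [onePass, if_neg h, inv]
      intro hf
      have hih := ih hf
      have hc := countP_onePass (fun x => decide (x < a)) (b :: t)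
      have hbt : inv (b :: t) = t.countP (fun x => decide (x < b)) + inv t := rfl
      omega

theorem bubbleLoop_sorted : ∀ (f : Nat) (l : List Int), inv l < f →
    bubbleLoop f l = PySem.List.sorted l (fun x => x) false := by
  intro f
  induction f with
  | zero => intro l h; omega
  | succ f ih =>
      intro l h
      simp only [bubbleLoop]
      by_cases hflag : (onePass l).2 = true
      · obtain ⟨h1, h2⟩ := onePass_flag_true l hflag
        rw [if_pos hflag, h1,
          PySem.List.sorted_eq_self_of_pairwise (key := fun x => x) (xs := l) h2]
      · rw [if_neg hflag]
        have hlt := inv_onePass_lt l (by simpa using hflag)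
        rw [ih _ (by omega)]
        exact PySem.List.sorted_eq_sorted_of_perm _ _ _ (fun _ _ h => h) (onePass_perm l)

theorem inv_le_sq : ∀ l : List Int, inv l ≤ l.length * l.length := by
  intro l
  induction l with
  | nil => simp [inv]
  | cons a t ih =>
      have hcount : t.countP (fun b => decide (b < a)) ≤ t.length := List.countP_le_length
      simp only [inv, List.length_cons]
      nlinarith

-- ===== VERDICT (by name: the statement is the Claim_ definition above) =====
theorem sortColors_spec : Claim_equal_sortColors := by
  intro nums _
  unfold Spec_sortColors sortColors sortColors_alt
  exact bubbleLoop_sorted _ _ (by have := inv_le_sq nums; omega)
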